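-- pv_equiv track=rewrite | github.com/leehiufung911/cdxml-toolkit | cdxml_toolkit/dsl/compact_parser.py | _strip_trailing_yield
-- ===== SOURCE A (Python) =====
-- def _strip_trailing_yield(line: str) -> tuple[str, str | None]:
--     """Remove a trailing ``(N%)`` yield annotation that is outside ``{}``.
--
--     Returns ``(cleaned_line, yield_string_or_None)``.
--     """
--     depth = 0
--     in_quote = False
--     last_close = -1
--     for i, ch in enumerate(line):
--         if ch == '"' and depth == 0:
--             in_quote = not in_quote
--         elif ch == '{' and not in_quote:
--             depth += 1
--         elif ch == '}' and not in_quote: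
--             depth = max(depth - 1, 0)
--         elif ch == ')' and depth == 0 and not in_quote:
--             last_close = i
--     if last_close < 1:
--         return line, None
--     # Walk backwards from last_close to find matching '('
--     depth = 0
--     in_quote = False
--     open_pos = -1
--     for i in range(last_close, -1, -1):
--         ch = line[i]
--         if ch == ')':
--             depth += 1
--         elif ch == '(':
--             depth -= 1
--             if depth == 0:
--                 open_pos = i
--                 break
--     if open_pos < 0:
--         return line, None
--     content = line[open_pos + 1 : last_close]
--     if '%' in content:
--         return line[:open_pos].rstrip(), content
--     return line, None
-- ===== SOURCE B (Python) =====
-- def _strip_trailing_yield(line: str) -> tuple[str, str | None]: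
--     """Single forward pass: a stack of '(' indices replaces A's backward re-scan."""
--     depth = 0
--     in_quote = False
--     stack = []
--     best = None  # (matching_open_index_or_None, close_index)
--     for i, ch in enumerate(line):
--         if ch == '"' and depth == 0:
--             in_quote = not in_quote
--         elif ch == '{' and not in_quote:
--             depth += 1
--         elif ch == '}' and not in_quote:
--             depth = max(depth - 1, 0)
--         elif ch == '(':
--             stack.append(i)
--         elif ch == ')':
--             open_i = stack.pop() if stack else None
--             if depth == 0 and not in_quote:
--                 best = (open_i, i)
--     if best is None or best[0] is None:
--         return line, None
--     open_i, close_i = best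
--     content = line[open_i + 1 : close_i]
--     if '%' in content:
--         return line[:open_i].rstrip(), content
--     return line, None
-- ===== Notes on version B (the rewrite author's own statement) =====
-- stated objective: alternative
-- what changed: A's second, backward paren-matching scan from the last depth-0 ')' is replaced by a single forward pass that keeps a stack of '(' indices and records the matching open position at each qualifying ')'.
import Mathlib
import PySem

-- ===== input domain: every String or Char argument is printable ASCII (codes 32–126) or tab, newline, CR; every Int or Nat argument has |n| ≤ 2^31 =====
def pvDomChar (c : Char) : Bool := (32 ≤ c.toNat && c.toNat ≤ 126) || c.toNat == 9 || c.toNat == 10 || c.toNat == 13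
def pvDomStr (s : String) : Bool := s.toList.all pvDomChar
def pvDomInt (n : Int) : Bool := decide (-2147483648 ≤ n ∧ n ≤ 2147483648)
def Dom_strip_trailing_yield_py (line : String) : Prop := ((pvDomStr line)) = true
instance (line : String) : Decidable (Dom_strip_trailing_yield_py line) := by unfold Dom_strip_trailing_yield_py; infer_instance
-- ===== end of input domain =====

-- B replaces A's second, backward paren-matching scan by a single forward pass that
-- carries a stack of '(' indices (objective: alternative single-pass decomposition).

-- ===== PORT A =====
-- forward loop of A: state (depth, in_quote, last_close)
def pvStepA : (Int × Bool × Int) → (Int × Char) → (Int × Bool × Int)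
  | (depth, inq, lc), (i, ch) =>
    if ch = '"' ∧ depth = 0 then (depth, !inq, lc)
    else if ch = '{' ∧ inq = false then (depth + 1, inq, lc)
    else if ch = '}' ∧ inq = false then (max (depth - 1) 0, inq, lc)
    else if ch = ')' ∧ depth = 0 ∧ inq = false then (depth, inq, i)
    else (depth, inq, lc)

-- backward loop of A over range(last_close, -1, -1); the `break` is the early return.
-- Indices produced by that range are in range for `line`, so the `.getD ' '` default
-- is never read: the port is exact.
def pvBackA (cs : List Char) : List Int → Int → Int
  | [], _ => -1
  | i :: rest, depth =>
    let ch := (PySem.List.pyGet? cs i).getD ' '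
    if ch = ')' then pvBackA cs rest (depth + 1)
    else if ch = '(' then (if depth - 1 = 0 then i else pvBackA cs rest (depth - 1))
    else pvBackA cs rest depth

def strip_trailing_yield_py (line : String) : String × Option String :=
  let r := (PySem.List.enumerate line.toList).foldl pvStepA (0, false, -1)
  let lc := r.2.2
  if lc < 1 then (line, none)
  else
    let op := pvBackA line.toList (PySem.List.pyRange lc (-1) (-1)) 0
    if op < 0 then (line, none)
    else
      let content := PySem.Str.slice line (some (op + 1)) (some lc)
      if PySem.Str.isIn "%" content then
        (PySem.Str.rstrip (PySem.Str.slice line none (some op)), some content)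
      else (line, none)

-- ===== PORT B =====
-- single forward loop of B: state (depth, in_quote, stack of '(' indices, best)
def pvStepB : (Int × Bool × List Int × Option (Option Int × Int)) →
    (Int × Char) → (Int × Bool × List Int × Option (Option Int × Int))
  | (depth, inq, stack, best), (i, ch) =>
    if ch = '"' ∧ depth = 0 then (depth, !inq, stack, best)
    else if ch = '{' ∧ inq = false then (depth + 1, inq, stack, best)
    else if ch = '}' ∧ inq = false then (max (depth - 1) 0, inq, stack, best)
    else if ch = '(' then (depth, inq, i :: stack, best)
    else if ch = ')' then
      (depth, inq, stack.tail, if depth = 0 ∧ inq = false then some (stack.head?, i) else best)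
    else (depth, inq, stack, best)

def strip_trailing_yield_py_alt (line : String) : String × Option String :=
  let r := (PySem.List.enumerate line.toList).foldl pvStepB (0, false, [], none)
  match r.2.2.2 with
  | none => (line, none)
  | some (none, _) => (line, none)
  | some (some op, cl) =>
    let content := PySem.Str.slice line (some (op + 1)) (some cl)
    if PySem.Str.isIn "%" content then
      (PySem.Str.rstrip (PySem.Str.slice line none (some op)), some content)
    else (line, none)

-- ===== PRECONDITION & SPEC =====
def Spec_strip_trailing_yield_py (line : String) (out : String × Option String) : Prop := out = strip_trailing_yield_py_alt line
instance (line : String) (out : String × Option String) : Decidable (Spec_strip_trailing_yield_py line out) := by unfold Spec_strip_trailing_yield_py; infer_instance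

-- ===== CLAIM (what is proved, stated in full; the proofs are below) =====
def Claim_equal_strip_trailing_yield_py : Prop := ∀ (line : String), Dom_strip_trailing_yield_py line → Spec_strip_trailing_yield_py line (strip_trailing_yield_py line)

-- ===== LEMMAS AND PROOFS =====

-- A's fold and B's fold, named for the proofs
def pvFoldA (cs : List Char) : Int × Bool × Int :=
  (PySem.List.enumerate cs).foldl pvStepA (0, false, -1)

def pvFoldB (cs : List Char) : Int × Bool × List Int × Option (Option Int × Int) :=
  (PySem.List.enumerate cs).foldl pvStepB (0, false, [], none)

theorem pvEnumSnoc {α : Type} (xs : List α) (x : α) (s : Int) :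
    PySem.List.enumerate (xs ++ [x]) s
      = PySem.List.enumerate xs s ++ [(s + xs.length, x)] := by
  induction xs generalizing s with
  | nil => simp [PySem.List.enumerate_nil, PySem.List.enumerate_cons]
  | cons y ys ih =>
    simp [PySem.List.enumerate_cons, ih (s + 1)]
    ring_nf

-- the stack of indices of currently unmatched '(' in cs[0:n], most recent first
def pvStack (cs : List Char) : Nat → List Int
  | 0 => []
  | n+1 =>
    match cs[n]? with
    | some c =>
      if c = '(' then (n : Int) :: pvStack cs n
      else if c = ')' then (pvStack cs n).tail
      else pvStack cs n
    | none => pvStack cs n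

theorem pvStack_append (cs : List Char) (c : Char) (n : Nat) (h : n ≤ cs.length) :
    pvStack (cs ++ [c]) n = pvStack cs n := by
  induction n with
  | zero => rfl
  | succ m ih =>
    have hm : m < cs.length := by omega
    simp [pvStack, List.getElem?_append_left hm, ih (by omega)]

theorem pvStack_nonneg (cs : List Char) (n : Nat) : ∀ x ∈ pvStack cs n, 0 ≤ x := by
  induction n with
  | zero => simp [pvStack]
  | succ m ih =>
    intro x hx
    simp only [pvStack] at hx
    rcases hg : cs[m]? with _ | c <;> simp only [hg] at hx
    · exact ih x hx
    · split_ifs at hx with h1 h2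
      · rcases List.mem_cons.mp hx with h | h
        · subst h; positivity
        · exact ih x h
      · exact ih x (List.mem_of_mem_tail hx)
      · exact ih x hx

-- A's backward scan read off the forward stack: scanning back from position m - 1
-- with depth k+1 lands on the k-th element of the unmatched-'(' stack of cs[0:m].
theorem pvBackA_eq (cs : List Char) (m : Nat) (hm : m ≤ cs.length) (k : Nat) :
    pvBackA cs (PySem.List.pyRange ((m : Int) - 1) (-1) (-1)) ((k : Int) + 1)
      = (match (pvStack cs m)[k]? with | some j => j | none => -1) := by
  induction m generalizing k with
  | zero =>
    rw [PySem.List.pyRange_neg_one_eq_nil (by norm_num)]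
    simp [pvBackA, pvStack]
  | succ n ih =>
    have hn : n < cs.length := by omega
    have hcons : PySem.List.pyRange ((↑(n+1) : Int) - 1) (-1) (-1)
        = (n : Int) :: PySem.List.pyRange ((n : Int) - 1) (-1) (-1) := by
      push_cast
      rw [PySem.List.pyRange_neg_one_cons (by omega)]
      ring_nf
    rw [hcons]
    have hget : (PySem.List.pyGet? cs ((n : Int))).getD ' ' = cs[n] := by
      simp [hn]
    simp only [pvBackA, hget, pvStack, List.getElem?_eq_getElem hn]
    by_cases h1 : cs[n] = ')'
    · simp only [h1]
      have : ((k : Int) + 1) + 1 = ((k + 1 : Nat) : Int) + 1 := by push_cast; ring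
      rw [this, ih (by omega) (k + 1)]
      simp [List.getElem?_tail]
    · by_cases h2 : cs[n] = '('
      · simp only [h2]
        by_cases hk : k = 0
        · subst hk; simp
        · obtain ⟨k', rfl⟩ : ∃ k', k = k' + 1 := ⟨k - 1, by omega⟩
          have hne : ¬ ((((k' + 1 : Nat) : Int) + 1) - 1 = 0) := by push_cast; omega
          rw [if_neg (by simp), if_neg hne]
          have : (((k' + 1 : Nat) : Int) + 1) - 1 = ((k' : Nat) : Int) + 1 := by push_cast; ring
          rw [this, ih (by omega) k']
          simp
      · rw [if_neg (by simp [h1]), if_neg (by simp [h2]), if_neg (by simp [h2]),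
          if_neg (by simp [h1]), ih (by omega) k]

-- joint loop invariant relating A's forward fold to B's
def pvInv (cs : List Char) : Prop :=
  (pvFoldB cs).1 = (pvFoldA cs).1 ∧
  (pvFoldB cs).2.1 = (pvFoldA cs).2.1 ∧
  (pvFoldB cs).2.2.1 = pvStack cs cs.length ∧
  (((pvFoldA cs).2.2 = -1 ∧ (pvFoldB cs).2.2.2 = none) ∨
    (∃ j : Nat, (pvFoldA cs).2.2 = (j : Int) ∧ j < cs.length ∧ cs[j]? = some ')' ∧
      (pvFoldB cs).2.2.2 = some ((pvStack cs j).head?, (j : Int))))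

theorem pvFoldA_snoc (cs : List Char) (c : Char) :
    pvFoldA (cs ++ [c]) = pvStepA (pvFoldA cs) ((cs.length : Int), c) := by
  simp [pvFoldA, pvEnumSnoc, List.foldl_append]

theorem pvFoldB_snoc (cs : List Char) (c : Char) :
    pvFoldB (cs ++ [c]) = pvStepB (pvFoldB cs) ((cs.length : Int), c) := by
  simp [pvFoldB, pvEnumSnoc, List.foldl_append]

theorem pvInv_holds (cs : List Char) : pvInv cs := by
  induction cs using List.reverseRecOn with
  | nil =>
    refine ⟨rfl, rfl, rfl, Or.inl ⟨rfl, rfl⟩⟩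
  | append_singleton cs c ih =>
    obtain ⟨ihd, ihq, ihst, ihbest⟩ := ih
    rcases hA : pvFoldA cs with ⟨d, q, lc⟩
    rcases hB : pvFoldB cs with ⟨d', q', st, best⟩
    simp only [hA, hB] at ihd ihq ihst ihbest
    subst ihd ihq ihst
    have hlen : (cs ++ [c]).length = cs.length + 1 := by simp
    have hgetc : (cs ++ [c])[cs.length]? = some c := by simp
    have hstk : pvStack (cs ++ [c]) (cs.length + 1)
        = (if c = '(' then (cs.length : Int) :: pvStack cs cs.length
           else if c = ')' then (pvStack cs cs.length).tail
           else pvStack cs cs.length) := by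
      simp only [pvStack, hgetc]
      split_ifs <;> rw [pvStack_append cs c cs.length le_rfl]
    have hsL : pvStack (cs ++ [c]) cs.length = pvStack cs cs.length :=
      pvStack_append cs c cs.length le_rfl
    have hgL : c = ')' → (cs ++ [c])[cs.length]? = some ')' := by
      intro h; rw [hgetc, h]
    unfold pvInv
    rw [pvFoldA_snoc, pvFoldB_snoc, hA, hB, hlen, hstk]
    simp only [pvStepA, pvStepB]
    rcases ihbest with ⟨hl, hb⟩ | ⟨j, hl, hj, hg, hb⟩ <;>
      [subst hl hb;
       (have hgj : (cs ++ [c])[j]? = some ')' := by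
          rw [List.getElem?_append_left hj]; exact hg
        have hsj : pvStack (cs ++ [c]) j = pvStack cs j :=
          pvStack_append cs c j (by omega)
        subst hl hb)] <;>
    split_ifs with h1 h2 h3 h4 h5 h6 <;>
      simp_all <;> omega

-- ===== VERDICT (by name: the statement is the Claim_ definition above) =====
theorem strip_trailing_yield_py_spec : Claim_equal_strip_trailing_yield_py := by
  intro line _
  unfold Spec_strip_trailing_yield_py
  obtain ⟨ihd, ihq, ihst, ihbest⟩ := pvInv_holds line.toList
  have e1 : strip_trailing_yield_py line =
      (if (pvFoldA line.toList).2.2 < 1 then (line, none)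
       else
         let op := pvBackA line.toList (PySem.List.pyRange ((pvFoldA line.toList).2.2) (-1) (-1)) 0
         if op < 0 then (line, none)
         else
           let content := PySem.Str.slice line (some (op + 1)) (some ((pvFoldA line.toList).2.2))
           if PySem.Str.isIn "%" content then
             (PySem.Str.rstrip (PySem.Str.slice line none (some op)), some content)
           else (line, none)) := rfl
  have e2 : strip_trailing_yield_py_alt line =
      (match (pvFoldB line.toList).2.2.2 with
       | none => (line, none)
       | some (none, _) => (line, none)
       | some (some op, cl) =>
         let content := PySem.Str.slice line (some (op + 1)) (some cl)
         if PySem.Str.isIn "%" content then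
           (PySem.Str.rstrip (PySem.Str.slice line none (some op)), some content)
         else (line, none)) := rfl
  rw [e1, e2]
  rcases ihbest with ⟨hl, hb⟩ | ⟨j, hl, hj, hg, hb⟩
  · rw [hl, hb]
    norm_num
  · rw [hl, hb]
    by_cases hj0 : j = 0
    · subst hj0
      simp [pvStack]
    · have hjlt : ¬ ((j : Int) < 1) := by omega
      rw [if_neg hjlt]
      have hcons : PySem.List.pyRange ((j : Int)) (-1) (-1)
          = (j : Int) :: PySem.List.pyRange ((j : Int) - 1) (-1) (-1) :=
        PySem.List.pyRange_neg_one_cons (by omega)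
      have hgetj : (PySem.List.pyGet? line.toList ((j : Int))).getD ' ' = ')' := by
        simp [hg]
      have hback : pvBackA line.toList (PySem.List.pyRange ((j : Int)) (-1) (-1)) 0
          = (match (pvStack line.toList j)[0]? with | some x => x | none => -1) := by
        rw [hcons]
        simp only [pvBackA, hgetj, reduceIte]
        have h01 : (0 : Int) + 1 = ((0 : Nat) : Int) + 1 := by norm_num
        rw [h01, pvBackA_eq line.toList j (by omega) 0]
      rw [hback, List.head?_eq_getElem?]
      rcases hh : (pvStack line.toList j)[0]? with _ | o
      · simp
      · have ho : 0 ≤ o :=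
          pvStack_nonneg line.toList j o (List.mem_of_getElem? hh)
        simp only [if_neg (show ¬ (o < 0) by omega)]
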